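-- pv_equiv track=rewrite | github.com/madfam-org/leyes-como-codigo-mx | apps/scraper/federal/dof_daily.py | _find_related_law
-- ===== SOURCE A (Python) =====
-- from typing import Dict, List, Optional
--
-- def _find_related_law(
--     title_upper: str,
--     existing_laws: Optional[List[str]],
--     existing_upper: List[str],
-- ) -> Optional[str]:
--     """
--     Find the best matching law from *existing_laws* mentioned in *title_upper*.
--
--     Uses a simple longest-match heuristic: the law whose name appears in the
--     title and is the longest match wins. Returns None when no match is found
--     or when *existing_laws* is empty / None.
--     """
--     if not existing_laws or not existing_upper:
--         return None
--
--     best_match: Optional[str] = None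
--     best_length = 0
--
--     for original, upper in zip(existing_laws, existing_upper):
--         if upper in title_upper and len(upper) > best_length:
--             best_match = original
--             best_length = len(upper)
--
--     return best_match
-- ===== SOURCE B (Python) =====
-- from typing import List, Optional
--
-- def _find_related_law(
--     title_upper: str,
--     existing_laws: Optional[List[str]],
--     existing_upper: List[str],
-- ) -> Optional[str]:
--     if not existing_laws or not existing_upper:
--         return None
--     # Empty names match every title but can never win, so drop them up front.
--     pairs = [(o, u) for o, u in zip(existing_laws, existing_upper) if u]
--     pairs.sort(key=lambda p: len(p[1]), reverse=True)  # stable: ties keep original order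
--     for original, upper in pairs:
--         if upper in title_upper:
--             return original
--     return None
-- ===== Notes on version B (the rewrite author's own statement) =====
-- stated objective: faster
-- what changed: Replaces the running-best accumulator fold with sort-then-first-match: pairs (original, upper) with non-empty upper are stably sorted by len(upper) descending and the first upper that is a substring of the title wins (stability reproduces A's first-wins tie-breaking; empty names are filtered since they can never beat best_length 0 in A).
import Mathlib
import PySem

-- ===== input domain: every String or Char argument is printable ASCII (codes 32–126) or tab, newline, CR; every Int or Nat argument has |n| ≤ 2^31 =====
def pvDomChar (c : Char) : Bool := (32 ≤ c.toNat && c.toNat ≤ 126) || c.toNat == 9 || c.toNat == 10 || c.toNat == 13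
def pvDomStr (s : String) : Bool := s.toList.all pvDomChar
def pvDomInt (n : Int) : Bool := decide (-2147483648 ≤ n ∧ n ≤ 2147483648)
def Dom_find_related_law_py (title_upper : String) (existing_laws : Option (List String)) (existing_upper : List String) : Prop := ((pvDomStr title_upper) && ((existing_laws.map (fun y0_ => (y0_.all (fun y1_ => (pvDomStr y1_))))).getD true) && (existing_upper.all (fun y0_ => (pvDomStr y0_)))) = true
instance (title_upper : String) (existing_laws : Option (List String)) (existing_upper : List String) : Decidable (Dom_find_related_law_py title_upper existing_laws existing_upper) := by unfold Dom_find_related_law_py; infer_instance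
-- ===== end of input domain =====

-- B replaces A's running-best fold by a stable sort of (original, upper) pairs by len(upper)
-- descending followed by first-substring-match ("alternative" objective; same return value).


-- ===== PORT A =====
def find_related_law_py (title_upper : String) (existing_laws : Option (List String)) (existing_upper : List String) : Option String :=
  match existing_laws with
  | none => none
  | some ls =>
    if ls.isEmpty || existing_upper.isEmpty then none
    else
      -- for original, upper in zip(...): if upper in title and len(upper) > best_length: update
      ((ls.zip existing_upper).foldl
        (fun (st : Option String × Int) p =>
          if PySem.Str.isIn p.2 title_upper && decide (st.2 < PySem.Str.len p.2)
          then (some p.1, PySem.Str.len p.2) else st)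
        (none, 0)).1

-- ===== PORT B =====
def find_related_law_py_alt (title_upper : String) (existing_laws : Option (List String)) (existing_upper : List String) : Option String :=
  match existing_laws with
  | none => none
  | some ls =>
    if ls.isEmpty || existing_upper.isEmpty then none
    else
      let pairs := (ls.zip existing_upper).filter (fun p => p.2 != "")
      let sp := PySem.List.sorted pairs (fun p => PySem.Str.len p.2) true
      (sp.find? (fun p => PySem.Str.isIn p.2 title_upper)).map Prod.fst

-- ===== PRECONDITION & SPEC =====
def Spec_find_related_law_py (title_upper : String) (existing_laws : Option (List String)) (existing_upper : List String) (out : Option String) : Prop := out = find_related_law_py_alt title_upper existing_laws existing_upper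
instance (title_upper : String) (existing_laws : Option (List String)) (existing_upper : List String) (out : Option String) : Decidable (Spec_find_related_law_py title_upper existing_laws existing_upper out) := by unfold Spec_find_related_law_py; infer_instance

-- ===== CLAIM (what is proved, stated in full; the proofs are below) =====
def Claim_equal_find_related_law_py : Prop := ∀ (title_upper : String) (existing_laws : Option (List String)) (existing_upper : List String), Dom_find_related_law_py title_upper existing_laws existing_upper → Spec_find_related_law_py title_upper existing_laws existing_upper (find_related_law_py title_upper existing_laws existing_upper)

-- ===== LEMMAS AND PROOFS =====

-- descending order is preserved by PySem's reverse insertBy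
lemma pairwise_insertBy {α : Type} (key : α → Int) (x : α) (s : List α)
    (h : s.Pairwise (fun a b => key b ≤ key a)) :
    (PySem.List.insertBy (fun a b => decide (key b < key a)) x s).Pairwise
      (fun a b => key b ≤ key a) := by
  induction s with
  | nil => simp [PySem.List.insertBy]
  | cons y ys ih =>
    rcases List.pairwise_cons.mp h with ⟨hy, ht⟩
    by_cases hlt : key y < key x
    · simp only [PySem.List.insertBy, hlt, decide_true, if_true]
      refine List.pairwise_cons.mpr ⟨?_, h⟩
      intro z hz
      rcases List.mem_cons.mp hz with rfl | hz
      · exact le_of_lt hlt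
      · exact le_trans (hy z hz) (le_of_lt hlt)
    · have hd : decide (key y < key x) = false := decide_eq_false hlt
      simp only [PySem.List.insertBy, hd, Bool.false_eq_true, if_false]
      refine List.pairwise_cons.mpr ⟨?_, ih ht⟩
      intro z hz
      rcases (PySem.List.mem_insertBy _ x z ys).mp hz with rfl | hz
      · omega
      · exact hy z hz

-- first match of a descending list after inserting x
lemma find?_insertBy {α : Type} (m : α → Bool) (key : α → Int) (x : α) (s : List α)
    (h : s.Pairwise (fun a b => key b ≤ key a)) :
    (PySem.List.insertBy (fun a b => decide (key b < key a)) x s).find? m =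
      match s.find? m with
      | none => if m x then some x else none
      | some p => if m x ∧ key p < key x then some x else some p := by
  induction s with
  | nil => simp [PySem.List.insertBy, List.find?]
  | cons y ys ih =>
    rcases List.pairwise_cons.mp h with ⟨hy, ht⟩
    by_cases hlt : key y < key x
    · simp only [PySem.List.insertBy, hlt, decide_true, if_true]
      rcases hfm : (y :: ys).find? m with _ | p
      · by_cases hmx : m x <;> simp [List.find?_cons, hmx, hfm]
      · have hpk : key p ≤ key y := by
          rcases List.mem_cons.mp (List.mem_of_find?_eq_some hfm) with rfl | hmem
          · exact le_refl _
          · exact hy p hmem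
        by_cases hmx : m x
        · have h2 : key p < key x := lt_of_le_of_lt hpk hlt
          simp [hmx, h2]
        · simp [hmx, hfm]
    · have hd : decide (key y < key x) = false := decide_eq_false hlt
      simp only [PySem.List.insertBy, hd, Bool.false_eq_true, if_false]
      by_cases hmy : m y
      · simp [hmy, hlt]
      · simp only [List.find?_cons, hmy]
        exact ih ht

-- the main invariant: A's fold state corresponds to the first match of the
-- descending list built so far by insertBy over the non-empty-upper pairs
set_option maxHeartbeats 1000000 in
lemma main_inv (t : String) (l : List (String × String)) :
    ∀ (s : List (String × String)) (b : Option String) (L : Int),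
    s.Pairwise (fun a c => PySem.Str.len c.2 ≤ PySem.Str.len a.2) →
    (s.find? (fun p => PySem.Str.isIn p.2 t)).map Prod.fst = b →
    L = ((s.find? (fun p => PySem.Str.isIn p.2 t)).map (fun p => PySem.Str.len p.2)).getD 0 →
    (((l.filter (fun p => p.2 != "")).foldl
        (fun acc x =>
          PySem.List.insertBy (fun a c => decide (PySem.Str.len c.2 < PySem.Str.len a.2)) x acc)
        s).find? (fun p => PySem.Str.isIn p.2 t)).map Prod.fst =
      (l.foldl
        (fun (st : Option String × Int) p =>
          if PySem.Str.isIn p.2 t && decide (st.2 < PySem.Str.len p.2)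
          then (some p.1, PySem.Str.len p.2) else st)
        (b, L)).1 := by
  induction l with
  | nil => intro s b L _ hb _; simpa using hb
  | cons x l ih =>
    intro s b L hp hb hL
    have hL0 : 0 ≤ L := by
      rcases hfs : s.find? (fun p => PySem.Str.isIn p.2 t) with _ | p <;>
        simp only [hfs] at hL <;> simp [hL, PySem.Str.len]
    by_cases hx : x.2 = ""
    · -- empty upper: B filters it out, A's strict-> test can never fire
      have hlen : PySem.Str.len x.2 = 0 := by simp [hx, PySem.Str.len]
      have hfx : (x.2 != "") = false := by simp [hx]
      have hd : decide (L < PySem.Str.len x.2) = false := decide_eq_false (by omega)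
      have hcF : (PySem.Str.isIn x.2 t && decide (L < PySem.Str.len x.2)) = false := by
        rw [hd]; simp
      simp only [List.filter_cons, hfx, Bool.false_eq_true, if_false, List.foldl_cons,
        hcF]
      exact ih s b L hp hb hL
    · have hne : (x.2 != "") = true := by simpa using hx
      simp only [List.filter_cons, hne, if_true, List.foldl_cons]
      have hp' := pairwise_insertBy (fun p => PySem.Str.len p.2) x s hp
      have hfind := find?_insertBy (fun p => PySem.Str.isIn p.2 t)
        (fun p => PySem.Str.len p.2) x s hp
      have hxpos : 0 < PySem.Str.len x.2 := by
        have h1 : x.2.toList ≠ [] := fun hnil => hx (by simpa using congrArg String.ofList hnil)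
        have h2 : 0 < x.2.toList.length := List.length_pos_iff.mpr h1
        simp only [PySem.Str.len]
        exact_mod_cast h2
      rcases hfs : s.find? (fun p => PySem.Str.isIn p.2 t) with _ | p
      · simp only [hfs] at hb hL hfind
        simp only [Option.map_none, Option.getD_none] at hb hL
        subst hb; subst hL
        by_cases hmx : PySem.Str.isIn x.2 t = true
        · have hcond : (PySem.Str.isIn x.2 t && decide ((0:Int) < PySem.Str.len x.2)) = true := by
            rw [hmx, decide_eq_true hxpos]; rfl
          simp only [hcond, if_true]
          exact ih _ (some x.1) (PySem.Str.len x.2) hp'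
            (by rw [hfind, if_pos hmx]; rfl) (by rw [hfind, if_pos hmx]; rfl)
        · have hmf : PySem.Str.isIn x.2 t = false := Bool.eq_false_iff.mpr hmx
          have hcond : (PySem.Str.isIn x.2 t && decide ((0:Int) < PySem.Str.len x.2)) = false := by
            rw [hmf, Bool.false_and]
          simp only [hcond, Bool.false_eq_true, if_false]
          exact ih _ none 0 hp'
            (by rw [hfind, if_neg hmx]; rfl) (by rw [hfind, if_neg hmx]; rfl)
      · simp only [hfs] at hb hL hfind
        simp only [Option.map_some, Option.getD_some] at hb hL
        subst hb; subst hL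
        by_cases hmx : PySem.Str.isIn x.2 t = true
        · by_cases hlt : PySem.Str.len p.2 < PySem.Str.len x.2
          · have hcond : (PySem.Str.isIn x.2 t &&
                decide (PySem.Str.len p.2 < PySem.Str.len x.2)) = true := by
              rw [hmx, decide_eq_true hlt]; rfl
            simp only [hcond, if_true]
            exact ih _ (some x.1) (PySem.Str.len x.2) hp'
              (by rw [hfind, if_pos ⟨hmx, hlt⟩]; rfl) (by rw [hfind, if_pos ⟨hmx, hlt⟩]; rfl)
          · have hcond : (PySem.Str.isIn x.2 t &&
                decide (PySem.Str.len p.2 < PySem.Str.len x.2)) = false := by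
              rw [decide_eq_false hlt, Bool.and_false]
            simp only [hcond, Bool.false_eq_true, if_false]
            exact ih _ (some p.1) (PySem.Str.len p.2) hp'
              (by rw [hfind, if_neg (fun h => hlt h.2)]; rfl)
              (by rw [hfind, if_neg (fun h => hlt h.2)]; rfl)
        · have hmf : PySem.Str.isIn x.2 t = false := Bool.eq_false_iff.mpr hmx
          have hcond : (PySem.Str.isIn x.2 t &&
              decide (PySem.Str.len p.2 < PySem.Str.len x.2)) = false := by
            rw [hmf, Bool.false_and]
          simp only [hcond, Bool.false_eq_true, if_false]
          exact ih _ (some p.1) (PySem.Str.len p.2) hp'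
            (by rw [hfind, if_neg (fun h => hmx h.1)]; rfl)
            (by rw [hfind, if_neg (fun h => hmx h.1)]; rfl)

-- ===== VERDICT (by name: the statement is the Claim_ definition above) =====
theorem find_related_law_py_spec : Claim_equal_find_related_law_py := by
  intro t laws uppers _
  unfold Spec_find_related_law_py find_related_law_py find_related_law_py_alt
  cases laws with
  | none => rfl
  | some ls =>
    by_cases hg : ls.isEmpty || uppers.isEmpty
    · simp [hg]
    · simp only [hg, Bool.false_eq_true, if_false]
      rw [PySem.List.sorted_rev_eq_foldl_insertBy]
      exact (main_inv t (ls.zip uppers) [] none 0 (by simp) (by simp [List.find?])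
        (by simp [List.find?])).symm
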